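-- pv_equiv track=rewrite | github.com/PhoneticsBug/Code-Workouts | workouts/Algorithm/9. September/week3-4/1107. 리모컨/1107.py | solution
-- ===== SOURCE A (Python) =====
-- def solution(channel, btn): # 이동 가능한 채널 검사
--     if channel == 0: # 0인 경우 0 버튼만 확인
--         if 0 in btn:
--             return False
--         return True
--
--     while channel > 0: # 자릿수를 옮겨가며 검사
--         digit = channel % 10
--         if digit in btn:
--             return False
--         channel //= 10
--     return True
-- ===== SOURCE B (Python) =====
-- def solution(channel, btn):
--     # Check each decimal digit of the channel via its string form.
--     return all(int(d) not in btn for d in str(channel))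
-- ===== Notes on version B (the rewrite author's own statement) =====
-- stated objective: simpler
-- what changed: B replaces the channel==0 special case plus the %10 // 10 digit-extraction loop with a single all() over the characters of str(channel); '0' is produced naturally so no guard is needed.
-- outside the precondition, e.g. on solution(-5, [5]): A returns True, B raises ValueError
import Mathlib
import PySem

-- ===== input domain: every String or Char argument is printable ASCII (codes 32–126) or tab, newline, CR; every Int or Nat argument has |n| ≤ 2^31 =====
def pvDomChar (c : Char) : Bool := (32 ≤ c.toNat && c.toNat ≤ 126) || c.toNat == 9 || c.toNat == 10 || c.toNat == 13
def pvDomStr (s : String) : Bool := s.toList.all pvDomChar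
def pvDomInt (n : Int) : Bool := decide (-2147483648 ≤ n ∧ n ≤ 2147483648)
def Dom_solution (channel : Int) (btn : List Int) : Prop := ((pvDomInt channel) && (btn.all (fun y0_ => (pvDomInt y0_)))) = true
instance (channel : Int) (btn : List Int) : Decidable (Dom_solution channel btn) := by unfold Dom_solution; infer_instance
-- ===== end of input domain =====

-- B checks each digit via the characters of str(channel) instead of a %10 // 10 loop with a
-- separate channel == 0 guard (objective: simpler). Pre_ restricts to channel ≥ 0, where B returns; B raises ValueError on negatives.


-- ===== PORT A =====
-- the 'while channel > 0' loop of A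
def solutionLoop (channel : Int) (btn : List Int) : Bool :=
  if h : channel > 0 then
    if btn.contains (PySem.Int.mod channel 10) then false
    else solutionLoop (PySem.Int.floordiv channel 10) btn
  else true
termination_by channel.toNat
decreasing_by
  obtain ⟨m, rfl⟩ : ∃ m : Nat, channel = (m : Int) := ⟨channel.toNat, (Int.toNat_of_nonneg (le_of_lt h)).symm⟩
  have hdiv : PySem.Int.floordiv (m : Int) 10 = ((m / 10 : Nat) : Int) := by
    exact_mod_cast PySem.Int.floordiv_natCast m 10
  rw [hdiv, Int.toNat_natCast, Int.toNat_natCast]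
  exact Nat.div_lt_self (by exact_mod_cast h) (by norm_num)

def solution (channel : Int) (btn : List Int) : Bool :=
  if channel = 0 then
    if btn.contains 0 then false else true
  else solutionLoop channel btn

-- ===== PORT B =====
-- int(d) for a single character d of str(channel); the none case (Python's ValueError) is unreachable on Pre_
def solution_alt (channel : Int) (btn : List Int) : Bool :=
  (PySem.Int.toChars channel).all (fun c =>
    match PySem.Int.ofChars? [c] with
    | some d => !btn.contains d
    | none => false)

-- ===== PRECONDITION & SPEC =====
-- Pre_ excludes negative channels (not valid channel numbers): A's digit loop is silently skipped
-- there and returns True, while B's int('-') raises ValueError.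
def Pre_solution (channel : Int) (btn : List Int) : Prop := 0 ≤ channel
instance (channel : Int) (btn : List Int) : Decidable (Pre_solution channel btn) := by unfold Pre_solution; infer_instance
def pvWitness_solution : Int × List Int := (103, [1, 7])

def Spec_solution (channel : Int) (btn : List Int) (out : Bool) : Prop := out = solution_alt channel btn
instance (channel : Int) (btn : List Int) (out : Bool) : Decidable (Spec_solution channel btn out) := by unfold Spec_solution; infer_instance

-- ===== CLAIM (what is proved, stated in full; the proofs are below) =====
def Claim_equal_solution : Prop := ∀ (channel : Int) (btn : List Int), Dom_solution channel btn → Pre_solution channel btn → Spec_solution channel btn (solution channel btn)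

-- ===== LEMMAS AND PROOFS =====

-- Bool.all is determined by the predicate's values on the members
theorem all_congr_mem {α : Type} {l : List α} {p q : α → Bool} (h : ∀ a ∈ l, p a = q a) :
    l.all p = l.all q := by
  induction l with
  | nil => rfl
  | cons a t ih => simp only [List.all_cons, h a (by simp), ih (fun b hb => h b (by simp [hb]))]

-- A's loop computes "no base-10 digit of n is a broken button"
theorem solutionLoop_eq_digits (n : Nat) (btn : List Int) (hn : 0 < n) :
    solutionLoop (n : Int) btn = (Nat.digits 10 n).all (fun d => !btn.contains (d : Int)) := by
  induction n using Nat.strong_induction_on with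
  | _ n ih =>
    rw [solutionLoop]
    have hpos : (n : Int) > 0 := by exact_mod_cast hn
    rw [dif_pos hpos]
    have hmod : PySem.Int.mod (n : Int) 10 = ((n % 10 : Nat) : Int) := by
      exact_mod_cast PySem.Int.mod_natCast n 10
    have hdiv : PySem.Int.floordiv (n : Int) 10 = ((n / 10 : Nat) : Int) := by
      exact_mod_cast PySem.Int.floordiv_natCast n 10
    rw [hmod, hdiv, Nat.digits_def' (by norm_num : 1 < 10) hn, List.all_cons]
    by_cases hb : btn.contains ((n % 10 : Nat) : Int) = true
    · rw [if_pos hb, hb]; simp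
    · rw [if_neg hb]
      rw [Bool.not_eq_true] at hb
      rw [hb]
      simp only [Bool.not_false, Bool.true_and]
      by_cases hz : n / 10 = 0
      · rw [hz]; rw [solutionLoop]; simp
      · exact ih (n / 10) (Nat.div_lt_self hn (by norm_num)) (Nat.pos_of_ne_zero hz)

-- Nat.toDigitsCore via Nat.digits
theorem toDigitsCore_eq (f : Nat) : ∀ (n : Nat) (ds : List Char), n ≤ f → 0 < n →
    Nat.toDigitsCore 10 f n ds = ((Nat.digits 10 n).map Nat.digitChar).reverse ++ ds := by
  induction f with
  | zero => intro n ds h1 h2; omega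
  | succ f ih =>
    intro n ds h1 h2
    have step : Nat.toDigitsCore 10 (f + 1) n ds =
        if n / 10 = 0 then (n % 10).digitChar :: ds
        else Nat.toDigitsCore 10 f (n / 10) ((n % 10).digitChar :: ds) := rfl
    rw [step, Nat.digits_def' (by norm_num : 1 < 10) h2]
    by_cases hz : n / 10 = 0
    · simp [hz]
    · have hlt : n / 10 < n := Nat.div_lt_self h2 (by norm_num : 1 < 10)
      rw [if_neg hz, ih (n / 10) _ (by omega) (Nat.pos_of_ne_zero hz)]
      simp

theorem toDigits_eq (n : Nat) (hn : 0 < n) :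
    Nat.toDigits 10 n = ((Nat.digits 10 n).map Nat.digitChar).reverse := by
  rw [Nat.toDigits, toDigitsCore_eq (n + 1) n [] (by omega) hn, List.append_nil]

theorem ofChars_digitChar (k : Nat) (hk : k < 10) :
    PySem.Int.ofChars? [Nat.digitChar k] = some (k : Int) := by
  interval_cases k <;> decide

-- ===== VERDICT (by name: the statement is the Claim_ definition above) =====
theorem solution_spec : Claim_equal_solution := by
  intro channel btn _hdom hpre
  unfold Spec_solution
  obtain ⟨n, rfl⟩ : ∃ n : Nat, channel = (n : Int) := ⟨channel.toNat, (Int.toNat_of_nonneg hpre).symm⟩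
  by_cases h0 : n = 0
  · subst h0
    simp only [Nat.cast_zero]
    rw [solution, if_pos rfl]
    have h1 : solution_alt 0 btn = !btn.contains 0 := by
      simp [solution_alt, show PySem.Int.toChars 0 = ['0'] from rfl,
        show PySem.Int.ofChars? ['0'] = some 0 from rfl]
    rw [h1]
    by_cases hb : btn.contains 0 = true <;> simp [*]
  · have hn : 0 < n := Nat.pos_of_ne_zero h0
    rw [solution, if_neg (by exact_mod_cast h0), solutionLoop_eq_digits n btn hn]
    unfold solution_alt
    rw [PySem.Int.toChars, if_neg (by omega), Int.toNat_natCast, toDigits_eq n hn,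
      List.all_reverse, List.all_map]
    apply all_congr_mem
    intro d hd
    have hd10 : d < 10 := Nat.digits_lt_base (by norm_num) hd
    simp [Function.comp, ofChars_digitChar d hd10]
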